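-- pv_equiv track=rewrite | github.com/strahlistvan/adventofcode | adventofcode2019/day16/day16.py | apply_pattern
-- ===== SOURCE A (Python) =====
-- def apply_pattern(input_signal, base_pattern):
--     digit = 0
--     pattern_idx = 1 #skip the very first value
--     for sign in input_signal:
--             digit += sign*base_pattern[pattern_idx]
--             pattern_idx= (pattern_idx + 1) % len(base_pattern)
--     digit = abs(digit)%10
--     return digit
-- ===== SOURCE B (Python) =====
-- def apply_pattern(input_signal, base_pattern):
--     m = len(base_pattern)
--     buckets = [0] * m
--     for i, sign in enumerate(input_signal):
--         buckets[(i + 1) % m] += sign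
--     digit = sum(b * q for b, q in zip(buckets, base_pattern))
--     return abs(digit) % 10
-- ===== Notes on version B (the rewrite author's own statement) =====
-- stated objective: alternative
-- what changed: Instead of a fused multiply-add with a running pattern index, B first aggregates signal elements into per-pattern-position buckets and then takes the dot product of the bucket table with the pattern in a second pass.
import Mathlib
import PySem

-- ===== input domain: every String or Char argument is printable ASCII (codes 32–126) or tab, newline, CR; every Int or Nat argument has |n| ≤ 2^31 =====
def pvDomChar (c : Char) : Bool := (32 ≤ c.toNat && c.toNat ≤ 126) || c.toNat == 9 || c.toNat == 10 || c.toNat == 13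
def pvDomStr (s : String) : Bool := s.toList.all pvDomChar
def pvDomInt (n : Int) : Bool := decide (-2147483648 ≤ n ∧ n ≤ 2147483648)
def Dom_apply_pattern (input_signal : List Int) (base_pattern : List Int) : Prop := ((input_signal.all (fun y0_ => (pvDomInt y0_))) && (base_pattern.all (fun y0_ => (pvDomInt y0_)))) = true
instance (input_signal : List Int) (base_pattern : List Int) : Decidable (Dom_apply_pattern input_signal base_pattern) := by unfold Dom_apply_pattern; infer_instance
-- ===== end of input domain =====

-- B replaces A's fused multiply-add with a running pattern index by two passes:
-- bucket the signal by pattern position, then dot the bucket table with the pattern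
-- (alternative decomposition; return value only, no side effects).

-- ===== PORT A =====
-- one loop step of A: digit += sign*base_pattern[pattern_idx]; pattern_idx = (pattern_idx+1) % len
-- (indexing is exact under Pre_: pattern_idx is always in range there; out of range = Python IndexError, excluded by Pre_)
def stepA (base_pattern : List Int) (acc : Int × Nat) (sign : Int) : Int × Nat :=
  (acc.1 + sign * base_pattern.getD acc.2 0, (acc.2 + 1) % base_pattern.length)

def apply_pattern (input_signal : List Int) (base_pattern : List Int) : Int :=
  let st := input_signal.foldl (stepA base_pattern) (0, 1)
  PySem.Int.mod |st.1| 10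

-- ===== PORT B =====
-- one loop step of B: buckets[(i+1) % m] += sign  (xi = (sign, i) from enumerate)
def stepB (m : Nat) (b : List Int) (xi : Int × Nat) : List Int :=
  b.set ((xi.2 + 1) % m) (b.getD ((xi.2 + 1) % m) 0 + xi.1)

-- sum(b*q for b, q in zip(xs, ys))
def dotZip (a : Int) (xs ys : List Int) : Int :=
  (xs.zip ys).foldl (fun a bq => a + bq.1 * bq.2) a

def apply_pattern_alt (input_signal : List Int) (base_pattern : List Int) : Int :=
  let m := base_pattern.length
  let buckets := (input_signal.zipIdx).foldl (stepB m) (List.replicate m 0)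
  let digit := dotZip 0 buckets base_pattern
  PySem.Int.mod |digit| 10

-- ===== PRECONDITION & SPEC =====
-- A raises IndexError when the signal is non-empty and base_pattern has fewer than 2
-- elements (it reads base_pattern[1] before ever wrapping the index); Pre_ excludes exactly that.
def Pre_apply_pattern (input_signal : List Int) (base_pattern : List Int) : Prop :=
  input_signal = [] ∨ 2 ≤ base_pattern.length
instance (input_signal : List Int) (base_pattern : List Int) : Decidable (Pre_apply_pattern input_signal base_pattern) := by unfold Pre_apply_pattern; infer_instance

def pvWitness_apply_pattern : List Int × List Int := ([1, 2, 3, 4], [0, 1, 0, -1])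

def Spec_apply_pattern (input_signal : List Int) (base_pattern : List Int) (out : Int) : Prop := out = apply_pattern_alt input_signal base_pattern
instance (input_signal : List Int) (base_pattern : List Int) (out : Int) : Decidable (Spec_apply_pattern input_signal base_pattern out) := by unfold Spec_apply_pattern; infer_instance

-- ===== CLAIM (what is proved, stated in full; the proofs are below) =====
def Claim_equal_apply_pattern : Prop := ∀ (input_signal : List Int) (base_pattern : List Int), Dom_apply_pattern input_signal base_pattern → Pre_apply_pattern input_signal base_pattern → Spec_apply_pattern input_signal base_pattern (apply_pattern input_signal base_pattern)

-- ===== LEMMAS AND PROOFS =====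

-- the common mathematical value: Σ s[k] * p[j_k] where j_0 = j and j_{k+1} = (j_k+1) % len p
def patSum (p : List Int) : List Int → Nat → Int
  | [], _ => 0
  | x :: xs, j => x * p.getD j 0 + patSum p xs ((j + 1) % p.length)

theorem foldA_eq (p : List Int) : ∀ (s : List Int) (a : Int) (j : Nat),
    (s.foldl (stepA p) (a, j)).1 = a + patSum p s j := by
  intro s
  induction s with
  | nil => intro a j; simp [patSum]
  | cons x xs ih =>
    intro a j
    simp only [List.foldl_cons, stepA, patSum]
    rw [ih]
    ring

theorem foldl_add_shift : ∀ (l : List (Int × Int)) (a c : Int),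
    l.foldl (fun a bq => a + bq.1 * bq.2) (a + c) =
      l.foldl (fun a bq => a + bq.1 * bq.2) a + c := by
  intro l
  induction l with
  | nil => intro a c; simp
  | cons y ys ih =>
    intro a c
    simp only [List.foldl_cons]
    rw [show a + c + y.1 * y.2 = (a + y.1 * y.2) + c by ring, ih]

theorem dotZip_replicate : ∀ (m : Nat) (p : List Int) (a : Int),
    dotZip a (List.replicate m 0) p = a := by
  intro m
  induction m with
  | zero => intro p a; simp [dotZip]
  | succ n ih =>
    intro p a
    cases p with
    | nil => simp [dotZip]
    | cons q qs =>
      simp only [List.replicate_succ, dotZip, List.zip_cons_cons, List.foldl_cons] at *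
      simpa using ih qs a

theorem dotZip_set : ∀ (b : List Int) (p : List Int) (j : Nat) (x a : Int), j < b.length →
    dotZip a (b.set j (b.getD j 0 + x)) p = dotZip a b p + x * p.getD j 0 := by
  intro b
  induction b with
  | nil => intro p j x a h; simp at h
  | cons y ys ih =>
    intro p j x a h
    cases j with
    | zero =>
      cases p with
      | nil => simp [dotZip]
      | cons q qs =>
        simp only [List.set_cons_zero, List.getD_cons_zero, dotZip, List.zip_cons_cons,
          List.foldl_cons]
        rw [show a + (y + x) * q = (a + y * q) + x * q by ring]
        exact foldl_add_shift _ _ _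
    | succ n =>
      cases p with
      | nil => simp [dotZip]
      | cons q qs =>
        simp only [List.set_cons_succ, List.getD_cons_succ, dotZip, List.zip_cons_cons,
          List.foldl_cons] at *
        exact ih qs n x (a + y * q) (by simpa using h)

theorem foldB_eq (p : List Int) (hm : 0 < p.length) : ∀ (s : List Int) (i : Nat) (b : List Int),
    b.length = p.length →
    dotZip 0 ((s.zipIdx i).foldl (stepB p.length) b) p =
      dotZip 0 b p + patSum p s ((i + 1) % p.length) := by
  intro s
  induction s with
  | nil => intro i b _; simp [patSum]
  | cons x xs ih =>
    intro i b hb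
    simp only [List.zipIdx_cons, List.foldl_cons]
    rw [ih (i + 1) _ (by simpa [stepB] using hb)]
    have hj : (i + 1) % p.length < b.length := by rw [hb]; exact Nat.mod_lt _ hm
    rw [show stepB p.length b (x, i) = b.set ((i + 1) % p.length)
        (b.getD ((i + 1) % p.length) 0 + x) from rfl]
    rw [dotZip_set b p _ x 0 hj]
    simp only [patSum]
    rw [Nat.mod_add_mod]
    ring

theorem apply_pattern_main (s p : List Int) (h : Pre_apply_pattern s p) :
    apply_pattern s p = apply_pattern_alt s p := by
  rcases h with h | h
  · subst h
    simp [apply_pattern, apply_pattern_alt, dotZip_replicate]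
  · have hm : 0 < p.length := by omega
    have hA := foldA_eq p s 0 1
    have hB := foldB_eq p hm s 0 (List.replicate p.length 0) (by simp)
    rw [dotZip_replicate] at hB
    have h1 : (0 + 1) % p.length = 1 := Nat.mod_eq_of_lt (by omega)
    simp only [apply_pattern, apply_pattern_alt, hA, hB, h1, zero_add]

-- ===== VERDICT (by name: the statement is the Claim_ definition above) =====
theorem apply_pattern_spec : Claim_equal_apply_pattern := by
  intro s p _ hpre
  exact apply_pattern_main s p hpre
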